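-- pv_equiv track=rewrite | github.com/Sherlock2019/Hugmesandbox | services/api/routers/chat.py | _generate_related_questions
-- ===== SOURCE A (Python) =====
-- from typing import Any, Dict, List, Literal, Optional, Tuple
--
-- def _generate_related_questions(question: str, mode: str, retrieved: List[Dict[str, Any]]) -> List[str]:
--     """Generate related question suggestions based on the current question and context."""
--     related = []
--     question_lower = question.lower()
--
--     # Extract key terms
--     key_terms = []
--     banking_terms = ["pd", "dti", "ltv", "credit", "score", "appraisal", "asset", "fraud", "compliance"]
--     for term in banking_terms:
--         if term in question_lower:
--             key_terms.append(term)
--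
--     # Mode-specific suggestions
--     if "credit" in mode.lower():
--         if "pd" in question_lower:
--             related.extend([
--                 "How is PD calculated?",
--                 "What is a good PD value?",
--                 "How does PD affect loan approval?"
--             ])
--         elif "dti" in question_lower:
--             related.extend([
--                 "What is an acceptable DTI ratio?",
--                 "How is DTI calculated?",
--                 "How does DTI impact credit decisions?"
--             ])
--         elif "ltv" in question_lower:
--             related.extend([
--                 "What is a good LTV ratio?",
--                 "How does LTV affect loan terms?",
--                 "What is the maximum LTV for approval?"
--             ])
--         else:
--             related.extend([
--                 "What is PD (Probability of Default)?",
--                 "How does the credit appraisal process work?",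
--                 "What factors affect credit decisions?"
--             ])
--     elif "asset" in mode.lower():
--         related.extend([
--             "What is FMV (Fair Market Value)?",
--             "How are assets appraised?",
--             "What factors affect asset valuation?"
--         ])
--     elif "fraud" in mode.lower() or "kyc" in mode.lower():
--         related.extend([
--             "How does fraud detection work?",
--             "What is KYC verification?",
--             "What are common fraud indicators?"
--         ])
--     elif "compliance" in mode.lower():
--         related.extend([
--             "What is PEP detection?",
--             "How are sanctions checked?",
--             "What compliance scores indicate approval?"
--         ])
--
--     # Generic follow-ups if we have retrieved documents
--     if retrieved:
--         related.append("Can you provide more details?")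
--         related.append("What are the key steps involved?")
--
--     # Limit to 3-4 related questions
--     return related[:4]
-- ===== SOURCE B (Python) =====
-- from typing import Any, Dict, List
--
-- _PD = ["How is PD calculated?", "What is a good PD value?", "How does PD affect loan approval?"]
-- _DTI = ["What is an acceptable DTI ratio?", "How is DTI calculated?", "How does DTI impact credit decisions?"]
-- _LTV = ["What is a good LTV ratio?", "How does LTV affect loan terms?", "What is the maximum LTV for approval?"]
-- _CREDIT_DEFAULT = ["What is PD (Probability of Default)?", "How does the credit appraisal process work?", "What factors affect credit decisions?"]
-- _ASSET = ["What is FMV (Fair Market Value)?", "How are assets appraised?", "What factors affect asset valuation?"]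
-- _FRAUD = ["How does fraud detection work?", "What is KYC verification?", "What are common fraud indicators?"]
-- _COMPLIANCE = ["What is PEP detection?", "How are sanctions checked?", "What compliance scores indicate approval?"]
--
-- # Flat rule base: (priority, mode keyword, optional question keyword, suggestions).
-- # Instead of a branch cascade, ALL rules are matched and the lowest-priority hit wins.
-- _RULES = [
--     (0, "credit", "pd", _PD),
--     (1, "credit", "dti", _DTI),
--     (2, "credit", "ltv", _LTV),
--     (3, "credit", None, _CREDIT_DEFAULT),
--     (4, "asset", None, _ASSET),
--     (5, "fraud", None, _FRAUD),
--     (6, "kyc", None, _FRAUD),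
--     (7, "compliance", None, _COMPLIANCE),
-- ]
--
--
-- def _generate_related_questions(question: str, mode: str, retrieved: List[Dict[str, Any]]) -> List[str]:
--     q = question.lower()
--     m = mode.lower()
--     matches = [(p, block) for p, mk, qk, block in _RULES
--                if mk in m and (qk is None or qk in q)]
--     related = min(matches, key=lambda t: t[0])[1] if matches else []
--     if retrieved:
--         related = related + ["Can you provide more details?", "What are the key steps involved?"]
--     return related[:4]
-- ===== Notes on version B (the rewrite author's own statement) =====
-- stated objective: alternative
-- what changed: Replaced the if/elif cascade (with its dead key_terms loop) by a flat rule base of (priority, mode-keyword, optional question-keyword, suggestions) rows: all rows are matched against the input and the minimum-priority match supplies the suggestions, so branch order becomes explicit priorities and the fraud/kyc disjunction becomes two rows sharing one block.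
import Mathlib
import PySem

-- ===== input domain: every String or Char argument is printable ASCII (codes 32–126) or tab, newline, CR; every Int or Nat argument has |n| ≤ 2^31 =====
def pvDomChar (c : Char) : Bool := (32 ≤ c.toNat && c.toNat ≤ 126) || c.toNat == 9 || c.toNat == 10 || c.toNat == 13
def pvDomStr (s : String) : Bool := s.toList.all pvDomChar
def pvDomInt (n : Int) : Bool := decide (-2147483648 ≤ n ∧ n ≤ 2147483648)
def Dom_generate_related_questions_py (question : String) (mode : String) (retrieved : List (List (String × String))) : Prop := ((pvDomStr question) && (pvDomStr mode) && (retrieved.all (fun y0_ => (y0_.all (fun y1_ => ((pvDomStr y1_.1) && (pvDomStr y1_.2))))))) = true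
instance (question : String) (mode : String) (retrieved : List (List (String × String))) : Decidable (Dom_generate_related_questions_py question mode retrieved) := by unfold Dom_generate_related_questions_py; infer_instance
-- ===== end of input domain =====

/- B replaces A's if/elif cascade by a flat prioritised rule base: every rule is matched and the
   minimum-priority match supplies the suggestions (objective: alternative, same return value). -/


-- ===== PORT A =====
def generate_related_questions_py (question : String) (mode : String) (retrieved : List (List (String × String))) : List String :=
  let related : List String := []
  let question_lower := PySem.Str.lower question
  -- key_terms loop (computed and unused, as in the Python)
  let _key_terms :=
    (["pd", "dti", "ltv", "credit", "score", "appraisal", "asset", "fraud", "compliance"] : List String).foldl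
      (fun acc term => if PySem.Str.isIn term question_lower then acc ++ [term] else acc) []
  let related :=
    if PySem.Str.isIn "credit" (PySem.Str.lower mode) then
      if PySem.Str.isIn "pd" question_lower then
        related ++ ["How is PD calculated?", "What is a good PD value?", "How does PD affect loan approval?"]
      else if PySem.Str.isIn "dti" question_lower then
        related ++ ["What is an acceptable DTI ratio?", "How is DTI calculated?", "How does DTI impact credit decisions?"]
      else if PySem.Str.isIn "ltv" question_lower then
        related ++ ["What is a good LTV ratio?", "How does LTV affect loan terms?", "What is the maximum LTV for approval?"]
      else
        related ++ ["What is PD (Probability of Default)?", "How does the credit appraisal process work?", "What factors affect credit decisions?"]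
    else if PySem.Str.isIn "asset" (PySem.Str.lower mode) then
      related ++ ["What is FMV (Fair Market Value)?", "How are assets appraised?", "What factors affect asset valuation?"]
    else if PySem.Str.isIn "fraud" (PySem.Str.lower mode) || PySem.Str.isIn "kyc" (PySem.Str.lower mode) then
      related ++ ["How does fraud detection work?", "What is KYC verification?", "What are common fraud indicators?"]
    else if PySem.Str.isIn "compliance" (PySem.Str.lower mode) then
      related ++ ["What is PEP detection?", "How are sanctions checked?", "What compliance scores indicate approval?"]
    else related
  let related := if retrieved ≠ [] then related ++ ["Can you provide more details?"] ++ ["What are the key steps involved?"] else related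
  PySem.List.slice related none (some 4)

-- ===== PORT B =====
def pvPD : List String := ["How is PD calculated?", "What is a good PD value?", "How does PD affect loan approval?"]
def pvDTI : List String := ["What is an acceptable DTI ratio?", "How is DTI calculated?", "How does DTI impact credit decisions?"]
def pvLTV : List String := ["What is a good LTV ratio?", "How does LTV affect loan terms?", "What is the maximum LTV for approval?"]
def pvCreditDefault : List String := ["What is PD (Probability of Default)?", "How does the credit appraisal process work?", "What factors affect credit decisions?"]
def pvAsset : List String := ["What is FMV (Fair Market Value)?", "How are assets appraised?", "What factors affect asset valuation?"]
def pvFraud : List String := ["How does fraud detection work?", "What is KYC verification?", "What are common fraud indicators?"]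
def pvCompliance : List String := ["What is PEP detection?", "How are sanctions checked?", "What compliance scores indicate approval?"]

-- flat rule base: (priority, mode keyword, optional question keyword, suggestions)
def pvRules : List (Nat × String × Option String × List String) :=
  [(0, "credit", some "pd", pvPD),
   (1, "credit", some "dti", pvDTI),
   (2, "credit", some "ltv", pvLTV),
   (3, "credit", none, pvCreditDefault),
   (4, "asset", none, pvAsset),
   (5, "fraud", none, pvFraud),
   (6, "kyc", none, pvFraud),
   (7, "compliance", none, pvCompliance)]

-- min(matches, key=lambda t: t[0]) — first element with minimal key; none on []
def pvMinByFst (xs : List (Nat × List String)) : Option (Nat × List String) :=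
  match xs with
  | [] => none
  | x :: rest => some (rest.foldl (fun best y => if y.1 < best.1 then y else best) x)

def generate_related_questions_py_alt (question : String) (mode : String) (retrieved : List (List (String × String))) : List String :=
  let q := PySem.Str.lower question
  let m := PySem.Str.lower mode
  let matched :=
    (pvRules.filter (fun r =>
      PySem.Str.isIn r.2.1 m &&
        (match r.2.2.1 with | none => true | some kw => PySem.Str.isIn kw q))).map
      (fun r => (r.1, r.2.2.2))
  let related := match pvMinByFst matched with | none => ([] : List String) | some t => t.2
  let related := if retrieved ≠ [] then related ++ ["Can you provide more details?", "What are the key steps involved?"] else related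
  PySem.List.slice related none (some 4)

-- ===== PRECONDITION & SPEC =====
def Spec_generate_related_questions_py (question : String) (mode : String) (retrieved : List (List (String × String))) (out : List String) : Prop := out = generate_related_questions_py_alt question mode retrieved
instance (question : String) (mode : String) (retrieved : List (List (String × String))) (out : List String) : Decidable (Spec_generate_related_questions_py question mode retrieved out) := by unfold Spec_generate_related_questions_py; infer_instance

-- ===== CLAIM (what is proved, stated in full; the proofs are below) =====
def Claim_equal_generate_related_questions_py : Prop := ∀ (question : String) (mode : String) (retrieved : List (List (String × String))), Dom_generate_related_questions_py question mode retrieved → Spec_generate_related_questions_py question mode retrieved (generate_related_questions_py question mode retrieved)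

-- ===== LEMMAS AND PROOFS =====

-- ===== VERDICT (by name: the statement is the Claim_ definition above) =====
set_option maxHeartbeats 4000000 in
theorem generate_related_questions_py_spec : Claim_equal_generate_related_questions_py := by
  intro question mode retrieved _
  unfold Spec_generate_related_questions_py generate_related_questions_py generate_related_questions_py_alt pvRules
  simp only [List.filter_cons, List.filter_nil, List.map_cons, List.map_nil]
  generalize PySem.Str.isIn "credit" (PySem.Str.lower mode) = b1
  generalize PySem.Str.isIn "pd" (PySem.Str.lower question) = b2
  generalize PySem.Str.isIn "dti" (PySem.Str.lower question) = b3
  generalize PySem.Str.isIn "ltv" (PySem.Str.lower question) = b4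
  generalize PySem.Str.isIn "asset" (PySem.Str.lower mode) = b5
  generalize PySem.Str.isIn "fraud" (PySem.Str.lower mode) = b6
  generalize PySem.Str.isIn "kyc" (PySem.Str.lower mode) = b7
  generalize PySem.Str.isIn "compliance" (PySem.Str.lower mode) = b8
  cases b1 <;> cases b2 <;> cases b3 <;> cases b4 <;> cases b5 <;> cases b6 <;> cases b7 <;>
    cases b8 <;> cases retrieved <;>
    first
    | rfl
    | simp [pvMinByFst, pvPD, pvDTI, pvLTV, pvCreditDefault, pvAsset, pvFraud, pvCompliance,
        PySem.List.slice]
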